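-- pv_equiv track=rewrite | github.com/nits2010/DataStructureAlgo | scripts/generators/standardize_file_headers.py | _remove_docstring_from_position
-- ===== SOURCE A (Python) =====
-- def _remove_docstring_from_position(content: str, start_pos: int) -> str:
--     """Remove docstring starting at given line position."""
--     lines = content.split('\n')
--
--     if start_pos >= len(lines) or not lines[start_pos].strip().startswith('"""'):
--         return content
--
--     # Find end of docstring
--     if lines[start_pos].count('"""') >= 2:
--         # Single line docstring
--         del lines[start_pos]
--     else:
--         # Multi-line docstring
--         end_pos = start_pos + 1
--         while end_pos < len(lines):
--             if '"""' in lines[end_pos]: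
--                 break
--             end_pos += 1
--
--         if end_pos < len(lines):
--             # Remove from start_pos to end_pos (inclusive)
--             del lines[start_pos:end_pos + 1]
--
--     # Remove following empty lines
--     while (start_pos < len(lines) and
--            lines[start_pos].strip() == ''):
--         del lines[start_pos]
--
--     return '\n'.join(lines)
-- ===== SOURCE B (Python) =====
-- def _remove_docstring_from_position(content: str, start_pos: int) -> str:
--     """Remove docstring starting at given line position."""
--     lines = content.split('\n')
--     n = len(lines)
--
--     if not (0 <= start_pos < n) or not lines[start_pos].strip().startswith('"""'):
--         return content
--
--     # End of the docstring block (inclusive), or None if no closing quote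
--     if lines[start_pos].count('"""') >= 2:
--         end = start_pos
--     else:
--         end = next((i for i in range(start_pos + 1, n) if '"""' in lines[i]), None)
--
--     if end is None:
--         return '\n'.join(lines)
--
--     # First non-blank line after the block
--     cut = next((i for i in range(end + 1, n) if lines[i].strip() != ''), n)
--
--     return '\n'.join(lines[:start_pos] + lines[cut:])
-- ===== Notes on version B (the rewrite author's own statement) =====
-- stated objective: alternative
-- what changed: Instead of mutating the line list with del at shifting positions and a delete-in-place loop for trailing blanks, B computes the block end and the first non-blank cut index and builds the result once as lines[:start_pos] + lines[cut:]. Pre_ excludes negative start_pos, on which A either raises IndexError (directly or when its blank-stripping loop walks off the front of the mutated list) or deletes at a Python wraparound index although a line position is naturally non-negative; B treats negative positions as out of range.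
-- outside the precondition, e.g. on _remove_docstring_from_position('a\n"""x"""\nb', -2): A returns 'a\nb', B returns 'a\n"""x"""\nb'
import Mathlib
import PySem

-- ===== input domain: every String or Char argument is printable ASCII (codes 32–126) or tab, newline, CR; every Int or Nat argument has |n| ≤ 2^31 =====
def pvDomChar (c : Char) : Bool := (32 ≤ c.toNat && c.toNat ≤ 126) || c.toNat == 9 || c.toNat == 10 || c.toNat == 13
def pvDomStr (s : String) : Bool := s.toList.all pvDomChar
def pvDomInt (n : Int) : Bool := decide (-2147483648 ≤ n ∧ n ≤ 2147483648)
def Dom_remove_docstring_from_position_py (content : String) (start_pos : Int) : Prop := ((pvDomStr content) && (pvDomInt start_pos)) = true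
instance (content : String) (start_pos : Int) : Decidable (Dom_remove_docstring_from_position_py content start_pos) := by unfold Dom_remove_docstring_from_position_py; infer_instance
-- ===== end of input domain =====

-- B removes the docstring by computing a keep-range (block end + first non-blank cut index) and
-- joining lines[:start_pos] ++ lines[cut:], instead of A's in-place deletions (alternative decomposition).

-- ===== PORT A =====

-- A's 'while end_pos < len(lines): if '"""' in lines[end_pos]: break; end_pos += 1'
def pvFindEnd (xs : List String) (e : Nat) : Nat :=
  if h : e < xs.length then
    if PySem.Str.isIn "\"\"\"" xs[e] then e else pvFindEnd xs (e + 1)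
  else e
termination_by xs.length - e

-- A's 'while start_pos < len(lines) and lines[start_pos].strip() == '': del lines[start_pos]'
def pvDelEmptyLoop (xs : List String) (s : Nat) : List String :=
  if h : s < xs.length then
    if PySem.Str.strip xs[s] == "" then pvDelEmptyLoop (xs.eraseIdx s) s else xs
  else xs
termination_by xs.length
decreasing_by simp [List.length_eraseIdx, h]; omega

def remove_docstring_from_position_py (content : String) (start_pos : Int) : String :=
  let lines := (PySem.Str.split? content "\n").getD []  -- sep "\n" is non-empty, so split? is always some
  if start_pos ≥ (lines.length : Int) ∨
     ¬ PySem.Str.startswith (PySem.Str.strip (PySem.List.pyGetD lines start_pos "")) "\"\"\"" = true then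
    content
  else
    let lines2 :=
      if PySem.Str.count (PySem.List.pyGetD lines start_pos "") "\"\"\"" ≥ 2 then
        -- del lines[start_pos]  (exact for 0 ≤ start_pos, which Pre_ guarantees)
        lines.eraseIdx start_pos.toNat
      else
        let e := pvFindEnd lines (start_pos.toNat + 1)
        if e < lines.length then
          -- del lines[start_pos:end_pos+1]  (exact for 0 ≤ start_pos)
          lines.take start_pos.toNat ++ lines.drop (e + 1)
        else lines
    let lines3 := pvDelEmptyLoop lines2 start_pos.toNat
    PySem.Str.join "\n" lines3

-- ===== PORT B =====

-- B's 'next((i for i in range(c, n) if '"""' in lines[i]), None)'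
def pvFindClose (xs : List String) (c : Nat) : Option Nat :=
  if h : c < xs.length then
    if PySem.Str.isIn "\"\"\"" xs[c] then some c else pvFindClose xs (c + 1)
  else none
termination_by xs.length - c

-- B's 'next((i for i in range(c, n) if lines[i].strip() != ''), n)'
def pvSkipEmpty (xs : List String) (c : Nat) : Nat :=
  if h : c < xs.length then
    if PySem.Str.strip xs[c] == "" then pvSkipEmpty xs (c + 1) else c
  else xs.length
termination_by xs.length - c

def remove_docstring_from_position_py_alt (content : String) (start_pos : Int) : String :=
  let lines := (PySem.Str.split? content "\n").getD []  -- sep "\n" is non-empty, so split? is always some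
  if ¬ (0 ≤ start_pos ∧ start_pos < (lines.length : Int)) ∨
     ¬ PySem.Str.startswith (PySem.Str.strip (PySem.List.pyGetD lines start_pos "")) "\"\"\"" = true then
    content
  else
    let s := start_pos.toNat
    let endOpt :=
      if PySem.Str.count (PySem.List.pyGetD lines start_pos "") "\"\"\"" ≥ 2 then some s
      else pvFindClose lines (s + 1)
    match endOpt with
    | none => PySem.Str.join "\n" lines
    | some e => PySem.Str.join "\n" (lines.take s ++ lines.drop (pvSkipEmpty lines (e + 1)))

-- ===== PRECONDITION & SPEC =====
-- Pre_ excludes negative start_pos, on which A either raises IndexError (directly, or when its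
-- blank-stripping loop walks off the front of the mutated list) or deletes at a Python wraparound
-- index although a line position is naturally non-negative; B treats negatives as out of range.
def Pre_remove_docstring_from_position_py (content : String) (start_pos : Int) : Prop :=
  0 ≤ start_pos
instance (content : String) (start_pos : Int) : Decidable (Pre_remove_docstring_from_position_py content start_pos) := by unfold Pre_remove_docstring_from_position_py; infer_instance

def pvWitness_remove_docstring_from_position_py : String × Int := ("\"\"\"doc\"\"\"\n\nx = 1", 0)

def Spec_remove_docstring_from_position_py (content : String) (start_pos : Int) (out : String) : Prop := out = remove_docstring_from_position_py_alt content start_pos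
instance (content : String) (start_pos : Int) (out : String) : Decidable (Spec_remove_docstring_from_position_py content start_pos out) := by unfold Spec_remove_docstring_from_position_py; infer_instance

-- ===== CLAIM (what is proved, stated in full; the proofs are below) =====
def Claim_equal_remove_docstring_from_position_py : Prop := ∀ (content : String) (start_pos : Int), Dom_remove_docstring_from_position_py content start_pos → Pre_remove_docstring_from_position_py content start_pos → Spec_remove_docstring_from_position_py content start_pos (remove_docstring_from_position_py content start_pos)

-- ===== LEMMAS AND PROOFS =====

theorem pvSkipEmpty_eq (xs : List String) (c : Nat) :
    xs.drop (pvSkipEmpty xs c) = (xs.drop c).dropWhile (fun l => PySem.Str.strip l == "") := by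
  induction c using pvSkipEmpty.induct xs with
  | case1 c h hp ih =>
    rw [pvSkipEmpty, dif_pos h, if_pos hp, ih, List.drop_eq_getElem_cons h, List.dropWhile_cons]
    simp [hp]
  | case2 c h hp =>
    rw [pvSkipEmpty, dif_pos h, if_neg hp, List.drop_eq_getElem_cons h, List.dropWhile_cons]
    simp only [hp, if_false, Bool.false_eq_true]
  | case3 c h =>
    rw [pvSkipEmpty, dif_neg h]
    simp only [not_lt] at h
    simp [List.drop_eq_nil_of_le h, List.drop_length]

theorem pvDelEmptyLoop_eq (xs : List String) (s : Nat) :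
    pvDelEmptyLoop xs s =
      xs.take s ++ (xs.drop s).dropWhile (fun l => PySem.Str.strip l == "") := by
  induction xs using pvDelEmptyLoop.induct s with
  | case1 xs h hp ih =>
    have h1 : (xs.eraseIdx s).take s = xs.take s := by
      rw [List.eraseIdx_eq_take_drop_succ, List.take_append_of_le_length (by simp; omega), List.take_take]
      simp
    have h2 : (xs.eraseIdx s).drop s = xs.drop (s + 1) := by
      rw [List.eraseIdx_eq_take_drop_succ, List.drop_append_of_le_length (by simp; omega)]
      simp
    rw [pvDelEmptyLoop, dif_pos h, if_pos hp, ih, h1, h2, List.drop_eq_getElem_cons h, List.dropWhile_cons]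
    simp [hp]
  | case2 xs h hp =>
    rw [pvDelEmptyLoop, dif_pos h, if_neg hp, List.drop_eq_getElem_cons h, List.dropWhile_cons]
    simp only [hp, if_false, Bool.false_eq_true]
    rw [← List.drop_eq_getElem_cons h, List.take_append_drop]
  | case3 xs h =>
    rw [pvDelEmptyLoop, dif_neg h]
    simp only [not_lt] at h
    simp [List.drop_eq_nil_of_le h, List.take_of_length_le h]

theorem pvFindClose_eq (xs : List String) (c : Nat) :
    pvFindClose xs c = if pvFindEnd xs c < xs.length then some (pvFindEnd xs c) else none := by
  induction c using pvFindClose.induct xs with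
  | case1 c h hp =>
    rw [pvFindClose, dif_pos h, if_pos hp, pvFindEnd, dif_pos h, if_pos hp, if_pos h]
  | case2 c h hp ih =>
    rw [pvFindClose, dif_pos h, if_neg hp]
    conv_rhs => rw [pvFindEnd, dif_pos h, if_neg hp]
    exact ih
  | case3 c h =>
    rw [pvFindClose, dif_neg h, pvFindEnd, dif_neg h, if_neg h]

-- ===== VERDICT (by name: the statement is the Claim_ definition above) =====
theorem strip_ne_empty_of_startswith (s : String)
    (h : PySem.Str.startswith (PySem.Str.strip s) "\"\"\"" = true) :
    (PySem.Str.strip s == "") = false := by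
  cases hb : (PySem.Str.strip s == "") with
  | false => rfl
  | true =>
    have he : PySem.Str.strip s = "" := by simpa using hb
    rw [he] at h
    exact absurd h (by decide)

theorem remove_docstring_from_position_py_spec : Claim_equal_remove_docstring_from_position_py := by
  intro content start_pos _hdom hpre
  have hs : 0 ≤ start_pos := hpre
  unfold Spec_remove_docstring_from_position_py
  unfold remove_docstring_from_position_py remove_docstring_from_position_py_alt
  set L : List String := (PySem.Str.split? content "\n").getD [] with hLdef
  by_cases hlen : start_pos ≥ (L.length : Int)
  · rw [if_pos (Or.inl hlen), if_pos (Or.inl (by omega))]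
  · by_cases hsw : PySem.Str.startswith (PySem.Str.strip (PySem.List.pyGetD L start_pos "")) "\"\"\"" = true
    · -- main branch
      have hA : ¬ (start_pos ≥ (L.length : Int) ∨
          ¬ PySem.Str.startswith (PySem.Str.strip (PySem.List.pyGetD L start_pos "")) "\"\"\"" = true) := by
        push Not; exact ⟨lt_of_not_ge hlen, hsw⟩
      have hB : ¬ (¬ (0 ≤ start_pos ∧ start_pos < (L.length : Int)) ∨
          ¬ PySem.Str.startswith (PySem.Str.strip (PySem.List.pyGetD L start_pos "")) "\"\"\"" = true) := by
        push Not; exact ⟨⟨hs, lt_of_not_ge hlen⟩, hsw⟩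
      rw [if_neg hA, if_neg hB]
      set t := start_pos.toNat with htdef
      have ht : t < L.length := by omega
      by_cases hcnt : PySem.Str.count (PySem.List.pyGetD L start_pos "") "\"\"\"" ≥ 2
      · -- single-line docstring
        simp only [hcnt, if_true]
        have h1 : (L.eraseIdx t).take t = L.take t := by
          rw [List.eraseIdx_eq_take_drop_succ, List.take_append_of_le_length (by simp; omega), List.take_take]
          simp
        have h2 : (L.eraseIdx t).drop t = L.drop (t + 1) := by
          rw [List.eraseIdx_eq_take_drop_succ, List.drop_append_of_le_length (by simp; omega)]
          simp
        rw [pvDelEmptyLoop_eq, h1, h2, pvSkipEmpty_eq]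
      · -- multi-line docstring
        simp only [hcnt, if_false, pvFindClose_eq]
        by_cases he : pvFindEnd L (t + 1) < L.length
        · simp only [he, if_true]
          set e := pvFindEnd L (t + 1) with hedef
          have h1 : (L.take t ++ L.drop (e + 1)).take t = L.take t := by
            rw [List.take_append_of_le_length (by simp; omega), List.take_take]
            simp
          have h2 : (L.take t ++ L.drop (e + 1)).drop t = L.drop (e + 1) := by
            rw [List.drop_append_of_le_length (by simp; omega)]
            simp
          rw [pvDelEmptyLoop_eq, h1, h2, pvSkipEmpty_eq]
        · simp only [he, if_false]
          rw [pvDelEmptyLoop_eq]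
          have hget : PySem.List.pyGetD L start_pos "" = L[t] :=
            PySem.List.pyGetD_eq_getElem _ _ hs (by exact_mod_cast lt_of_not_ge hlen)
          have hne : (PySem.Str.strip L[t] == "") = false :=
            strip_ne_empty_of_startswith _ (hget ▸ hsw)
          rw [List.drop_eq_getElem_cons ht, List.dropWhile_cons]
          simp only [hne, Bool.false_eq_true, if_false]
          rw [← List.drop_eq_getElem_cons ht, List.take_append_drop]
    · rw [if_pos (Or.inr hsw), if_pos (Or.inr hsw)]
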